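-- pv_equiv track=rewrite | github.com/emilykl/advent-of-code-2022 | day11.py | compute_monkey_totals
-- ===== SOURCE A (Python) =====
-- def compute_monkey_totals(states):
--     totals = []
--     for i in range(len(states[0])):
--         monkey_items = [state[i] for state in states]
--         monkey_total_thrown = 0
--         for j in range(len(monkey_items) - 1):
--             if len(monkey_items[j + 1]) == 0:
--                 monkey_total_thrown += len(monkey_items[j])
--         totals.append(monkey_total_thrown)
--     return totals
-- ===== SOURCE B (Python) =====
-- def compute_monkey_totals(states):
--     # Structural recursion over the list of states, building the totals
--     # back-to-front; no transposition and no index arithmetic.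
--     def go(rows):
--         if len(rows) <= 1:
--             return [0] * len(rows[0])
--         tail = go(rows[1:])
--         return [t + (len(p) if len(q) == 0 else 0)
--                 for t, p, q in zip(tail, rows[0], rows[1])]
--     return go(states)
-- ===== Notes on version B (the rewrite author's own statement) =====
-- stated objective: alternative
-- what changed: B replaces A's index loops and per-monkey transposed column lists by structural recursion over the list of states, building the totals back-to-front with a zip at each step (no transposition, no index arithmetic).
import Mathlib
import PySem

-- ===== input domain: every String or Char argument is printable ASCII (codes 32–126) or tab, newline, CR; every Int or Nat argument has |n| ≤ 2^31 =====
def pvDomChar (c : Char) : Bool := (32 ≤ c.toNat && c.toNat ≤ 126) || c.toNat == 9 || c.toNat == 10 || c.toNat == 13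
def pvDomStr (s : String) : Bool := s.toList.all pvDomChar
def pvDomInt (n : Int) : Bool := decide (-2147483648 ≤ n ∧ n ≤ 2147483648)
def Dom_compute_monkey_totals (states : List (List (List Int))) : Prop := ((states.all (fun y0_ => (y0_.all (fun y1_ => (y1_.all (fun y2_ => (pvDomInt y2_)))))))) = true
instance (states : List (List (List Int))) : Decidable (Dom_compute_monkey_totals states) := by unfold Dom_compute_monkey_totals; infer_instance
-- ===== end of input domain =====

-- B replaces A's index loops and transposed column lists by structural recursion
-- over the list of states, building the totals back-to-front (alternative decomposition, same cost).

-- ===== PORT A =====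
def compute_monkey_totals (states : List (List (List Int))) : List Int :=
  (List.range (states.headD []).length).foldl
    (fun totals i =>
      let monkey_items := states.map (fun state => state.getD i [])
      let monkey_total_thrown : Int :=
        (List.range (monkey_items.length - 1)).foldl
          (fun acc j =>
            if (monkey_items.getD (j+1) []).length = 0
            then acc + ((monkey_items.getD j []).length : Int)
            else acc) 0
      totals ++ [monkey_total_thrown]) []

-- ===== PORT B =====
-- `go(rows)` of Source B: structural recursion on the list of states.
def pvGo : List (List (List Int)) → List Int
  | [] => []            -- Python raises IndexError here (rows[0]); excluded by Pre_
  | [r] => List.replicate r.length 0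
  | p :: q :: rest =>
      ((pvGo (q :: rest)).zip (p.zip q)).map
        (fun x => x.1 + (if x.2.2.length = 0 then (x.2.1.length : Int) else 0))

def compute_monkey_totals_alt (states : List (List (List Int))) : List Int :=
  pvGo states

-- ===== PRECONDITION & SPEC =====
-- Pre_ excludes exactly the inputs on which A raises IndexError: the empty list
-- of states, and ragged inputs where some state is shorter than states[0].
def Pre_compute_monkey_totals (states : List (List (List Int))) : Prop :=
  states ≠ [] ∧ ∀ s ∈ states, (states.headD []).length ≤ s.length
instance (states : List (List (List Int))) : Decidable (Pre_compute_monkey_totals states) := by unfold Pre_compute_monkey_totals; infer_instance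
def pvWitness_compute_monkey_totals : List (List (List Int)) :=
  [[[1,2],[3]], [[],[3]], [[5],[]]]
def Spec_compute_monkey_totals (states : List (List (List Int))) (out : List Int) : Prop := out = compute_monkey_totals_alt states
instance (states : List (List (List Int))) (out : List Int) : Decidable (Spec_compute_monkey_totals states out) := by unfold Spec_compute_monkey_totals; infer_instance

-- ===== CLAIM (what is proved, stated in full; the proofs are below) =====
def Claim_equal_compute_monkey_totals : Prop := ∀ (states : List (List (List Int))), Dom_compute_monkey_totals states → Pre_compute_monkey_totals states → Spec_compute_monkey_totals states (compute_monkey_totals states)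

-- ===== LEMMAS AND PROOFS =====

/-- Sum, over consecutive pairs of states, of the contribution at monkey index `i`. -/
def pvS : List (List (List Int)) → Nat → Int
  | [], _ => 0
  | [_], _ => 0
  | p :: q :: rest, i =>
      (if ((q.getD i []).length = 0) then ((p.getD i []).length : Int) else 0) + pvS (q :: rest) i

/-- Length of `pvGo`'s result: the minimum of the rows' lengths. -/
def pvM : List (List (List Int)) → Nat
  | [] => 0
  | [r] => r.length
  | p :: q :: rest => min p.length (pvM (q :: rest))

theorem pv_foldl_append {α β : Type} (f : α → β) :
    ∀ (l : List α) (acc : List β),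
      l.foldl (fun acc x => acc ++ [f x]) acc = acc ++ l.map f := by
  intro l
  induction l with
  | nil => intro acc; simp
  | cons x xs ih => intro acc; simp [List.foldl, ih]

theorem pv_foldl_if_sum (c : Nat → Prop) [DecidablePred c] (v : Nat → Int) :
    ∀ (l : List Nat) (a : Int),
      l.foldl (fun acc j => if c j then acc + v j else acc) a
        = a + (l.map (fun j => if c j then v j else 0)).sum := by
  intro l
  induction l with
  | nil => intro a; simp
  | cons x xs ih =>
    intro a
    simp only [List.foldl, List.map, List.sum_cons]
    by_cases h : c x
    · simp [h, ih]; ring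
    · simp [h, ih]

/-- A's inner per-monkey sum equals `pvS`. -/
theorem pv_inner_eq_S (i : Nat) :
    ∀ (states : List (List (List Int))),
      ((List.range (states.length - 1)).map
        (fun j => if ((states.map (fun s => s.getD i [])).getD (j+1) []).length = 0
                  then (((states.map (fun s => s.getD i [])).getD j []).length : Int)
                  else 0)).sum = pvS states i := by
  intro states
  induction states with
  | nil => simp [pvS]
  | cons p rest ih =>
    cases rest with
    | nil => simp [pvS]
    | cons q rest' =>
      simp only [pvS]
      rw [show (p :: q :: rest').length - 1 = ((q :: rest').length - 1) + 1 by simp,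
          List.range_succ_eq_map]
      simp only [List.map_cons, List.sum_cons, List.map_map]
      rw [← ih]
      congr 1

/-- One recursion step of B on a `(range m).map c` tail. -/
theorem pv_step (m : Nat) (c : Nat → Int) (p q : List (List Int)) :
    (((List.range m).map c).zip (p.zip q)).map
        (fun x => x.1 + (if x.2.2.length = 0 then (x.2.1.length : Int) else 0))
      = (List.range (min p.length (min m q.length))).map
          (fun i => c i + (if ((q.getD i []).length = 0) then ((p.getD i []).length : Int) else 0)) := by
  apply List.ext_getElem
  · simp; omega
  · intro i h1 h2
    have hi : i < min p.length (min m q.length) := by simpa using h2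
    have hip : i < p.length := by omega
    have hiq : i < q.length := by omega
    simp [List.getElem_zip, List.getElem?_eq_getElem hip, List.getElem?_eq_getElem hiq]

/-- `pvM` is bounded by the head's length. -/
theorem pvM_le_head (q : List (List Int)) (rest : List (List (List Int))) :
    pvM (q :: rest) ≤ q.length := by
  cases rest with
  | nil => simp [pvM]
  | cons r rr => simp [pvM]

/-- `pvGo` computes `pvS` pointwise, up to the minimum row length. -/
theorem pvGo_eq : ∀ (l : List (List (List Int))),
    pvGo l = (List.range (pvM l)).map (fun i => pvS l i) := by
  intro l
  induction l with
  | nil => simp [pvGo, pvM]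
  | cons p rest ih =>
    cases rest with
    | nil => simp [pvGo, pvM, pvS, List.map_const']
    | cons q rest' =>
      simp only [pvGo, pvM, ih]
      rw [pv_step (pvM (q :: rest')) (fun i => pvS (q :: rest') i) p q]
      have hm : min p.length (min (pvM (q :: rest')) q.length)
          = min p.length (pvM (q :: rest')) := by
        have := pvM_le_head q rest'
        omega
      rw [hm]
      apply List.map_congr_left
      intro i _
      simp [pvS]
      ring

/-- `pvM` is bounded below by any common lower bound on the rows' lengths. -/
theorem pvM_ge (n : Nat) : ∀ (l : List (List (List Int))), l ≠ [] →
    (∀ s ∈ l, n ≤ s.length) → n ≤ pvM l := by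
  intro l
  induction l with
  | nil => intro h; exact absurd rfl h
  | cons p rest ih =>
    intro _ hlen
    cases rest with
    | nil => simpa [pvM] using hlen p (by simp)
    | cons q rest' =>
      have h1 : n ≤ p.length := hlen p (by simp)
      have h2 : n ≤ pvM (q :: rest') :=
        ih (by simp) (fun s hs => hlen s (List.mem_cons_of_mem _ hs))
      simp [pvM]; omega

/-- Under Pre_, the minimum row length is exactly `states[0].length`. -/
theorem pvM_eq (n : Nat) : ∀ (l : List (List (List Int))), l ≠ [] →
    (∀ s ∈ l, n ≤ s.length) → ((l.headD []).length = n) → pvM l = n := by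
  intro l
  induction l with
  | nil => intro h; exact absurd rfl h
  | cons p rest ih =>
    intro _ hlen hhead
    have hpn : p.length = n := by simpa using hhead
    cases rest with
    | nil => simpa [pvM] using hpn
    | cons q rest' =>
      have hlb : n ≤ pvM (q :: rest') :=
        pvM_ge n (q :: rest') (by simp) (fun s hs => hlen s (List.mem_cons_of_mem _ hs))
      simp [pvM, hpn]; omega

-- ===== VERDICT (by name: the statement is the Claim_ definition above) =====
theorem compute_monkey_totals_spec : Claim_equal_compute_monkey_totals := by
  intro states _ hpre
  unfold Spec_compute_monkey_totals compute_monkey_totals compute_monkey_totals_alt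
  obtain ⟨hne, hlen⟩ := hpre
  rw [pv_foldl_append, List.nil_append, pvGo_eq,
      pvM_eq (states.headD []).length states hne hlen rfl]
  apply List.map_congr_left
  intro i _
  simp only [List.length_map]
  rw [pv_foldl_if_sum (fun j => ((states.map (fun state => state.getD i [])).getD (j+1) []).length = 0)
        (fun j => (((states.map (fun state => state.getD i [])).getD j []).length : Int))]
  rw [pv_inner_eq_S i states]
  simp
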